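-- pv_equiv track=rewrite | github.com/Mire1403/AMP-Comparative-Clustering-and-Motif-Analysis | scripts/05_statistics/06_build_fmap_input.py | clean_sequence_for_fmap
-- ===== SOURCE A (Python) =====
-- from typing import Dict, Iterable, List, Tuple
--
-- STANDARD_AA = set("ACDEFGHIKLMNPQRSTVWY")
--
-- def clean_sequence_for_fmap(seq: str) -> Tuple[str, str, bool]:
--     """
--     Keep only standard amino acids for FMAP output.
--
--     Replace:
--       J -> L
--       B -> D
--       Z -> E
--       U -> C
--       O -> K
--       X -> A
--
--     Any remaining non-standard character is converted to A.
--
--     Returns: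
--       cleaned_seq
--       cleaning_notes
--       had_nonstandard_before_cleaning
--     """
--     seq = seq.strip().upper()
--
--     replacements = {
--         "J": "L",
--         "B": "D",
--         "Z": "E",
--         "U": "C",
--         "O": "K",
--         "X": "A",
--     }
--
--     cleaned: List[str] = []
--     notes: List[str] = []
--     had_nonstandard = False
--
--     for aa in seq:
--         original = aa
--         if aa not in STANDARD_AA:
--             had_nonstandard = True
--
--         aa = replacements.get(aa, aa)
--         if aa not in STANDARD_AA:
--             aa = "A"
--             if original not in replacements:
--                 notes.append(f"{original}->A")
--         else:
--             if original != aa: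
--                 notes.append(f"{original}->{aa}")
--
--         cleaned.append(aa)
--
--     unique_notes = ";".join(sorted(set(notes))) if notes else ""
--     return "".join(cleaned), unique_notes, had_nonstandard
-- ===== SOURCE B (Python) =====
-- STANDARD_AA = set("ACDEFGHIKLMNPQRSTVWY")
--
-- def clean_sequence_for_fmap(seq):
--     s = seq.strip().upper()
--     replacements = {"J": "L", "B": "D", "Z": "E", "U": "C", "O": "K", "X": "A"}
--     table = {}
--     notes = set()
--     for c in set(s):
--         t = replacements.get(c, c if c in STANDARD_AA else "A")
--         table[ord(c)] = t
--         if t != c: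
--             notes.add(f"{c}->{t}")
--     return s.translate(table), ";".join(sorted(notes)), any(c not in STANDARD_AA for c in s)
-- ===== Notes on version B (the rewrite author's own statement) =====
-- stated objective: faster
-- what changed: Replaces A's per-character branch-and-append loop (building a cleaned list and a duplicate-laden notes list) by computing a target once per DISTINCT character, building a str.translate table and a notes set over set(seq), then cleaning the whole string with one s.translate(table) call.
import Mathlib
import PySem

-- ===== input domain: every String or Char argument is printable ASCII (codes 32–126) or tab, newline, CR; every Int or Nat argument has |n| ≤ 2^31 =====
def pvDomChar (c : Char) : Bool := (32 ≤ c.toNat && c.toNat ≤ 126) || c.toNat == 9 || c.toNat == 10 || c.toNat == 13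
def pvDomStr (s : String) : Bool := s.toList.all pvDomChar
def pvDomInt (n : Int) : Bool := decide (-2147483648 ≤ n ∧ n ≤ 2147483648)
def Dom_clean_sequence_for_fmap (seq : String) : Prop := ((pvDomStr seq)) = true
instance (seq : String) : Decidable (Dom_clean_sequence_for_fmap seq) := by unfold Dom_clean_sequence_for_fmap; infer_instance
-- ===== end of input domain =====

-- B replaces A's per-character branch-and-append loop by a per-DISTINCT-character
-- translation table plus notes set, then cleans the string in one str.translate pass
-- (measurably faster: the per-char scan runs in C).

-- ===== PORT A =====
def pvSTD : PySem.Set Char := PySem.Set.ofList "ACDEFGHIKLMNPQRSTVWY".toList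

def pvREPL : PySem.Dict Char Char :=
  PySem.Dict.ofList [('J','L'), ('B','D'), ('Z','E'), ('U','C'), ('O','K'), ('X','A')]

-- f"{original}->{aa}" for single characters
def pvNote (o t : Char) : String := String.ofList [o, '-', '>', t]

-- the body of A's 'for aa in seq' loop, state = (cleaned, notes, had_nonstandard)
def pvStepA (st : List Char × List String × Bool) (aa : Char) : List Char × List String × Bool :=
  let original := aa
  let had := if pvSTD.contains aa then st.2.2 else true
  let aa := (pvREPL.get? aa).getD aa
  if ¬ (pvSTD.contains aa) then
    if ¬ (pvREPL.contains original) then (st.1 ++ ['A'], st.2.1 ++ [pvNote original 'A'], had)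
    else (st.1 ++ ['A'], st.2.1, had)
  else
    if original ≠ aa then (st.1 ++ [aa], st.2.1 ++ [pvNote original aa], had)
    else (st.1 ++ [aa], st.2.1, had)

-- "".join over single-character strings is String.ofList of the char list (exact)
def clean_sequence_for_fmap (seq : String) : String × String × Bool :=
  let s := PySem.Chars.upper (PySem.Chars.strip seq.toList)
  let r := s.foldl pvStepA ([], [], false)
  let unique := if r.2.1 ≠ [] then
      PySem.Str.join ";" (PySem.List.sorted (PySem.Set.ofList r.2.1) (fun x => x))
    else ""
  (String.ofList r.1, unique, r.2.2)

-- ===== PORT B =====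
-- repl.get(c, c if c in STANDARD_AA else "A")
def pvTarget (c : Char) : Char :=
  (pvREPL.get? c).getD (if pvSTD.contains c then c else 'A')

-- body of B's 'for c in set(s)' loop, state = (table, notes); the Python table is
-- keyed by ord(c) — ord is injective, so a Char-keyed dict is exact
def pvStepB (st : PySem.Dict Char Char × PySem.Set String) (c : Char) :
    PySem.Dict Char Char × PySem.Set String :=
  let t := pvTarget c
  (st.1.insert c t, if t ≠ c then PySem.Set.add st.2 (pvNote c t) else st.2)

-- s.translate(table) with single-char values: chars missing from the table stay (exact)
def clean_sequence_for_fmap_alt (seq : String) : String × String × Bool :=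
  let s := PySem.Chars.upper (PySem.Chars.strip seq.toList)
  let r := (PySem.Set.ofList s).foldl pvStepB (PySem.Dict.empty, PySem.Set.empty)
  (String.ofList (s.map (fun c => ((r.1.get? c).getD c))),
   PySem.Str.join ";" (PySem.List.sorted r.2 (fun x => x)),
   s.any (fun c => !(pvSTD.contains c)))

-- ===== PRECONDITION & SPEC =====
def Spec_clean_sequence_for_fmap (seq : String) (out : String × String × Bool) : Prop := out = clean_sequence_for_fmap_alt seq
instance (seq : String) (out : String × String × Bool) : Decidable (Spec_clean_sequence_for_fmap seq out) := by unfold Spec_clean_sequence_for_fmap; infer_instance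

-- ===== CLAIM (what is proved, stated in full; the proofs are below) =====
def Claim_equal_clean_sequence_for_fmap : Prop := ∀ (seq : String), Dom_clean_sequence_for_fmap seq → Spec_clean_sequence_for_fmap seq (clean_sequence_for_fmap seq)

-- ===== LEMMAS AND PROOFS =====

-- the note A emits for character c, if any
def pvNote? (c : Char) : Option String :=
  if pvTarget c ≠ c then some (pvNote c (pvTarget c)) else none

theorem repl_items : pvREPL.items = [('J','L'), ('B','D'), ('Z','E'), ('U','C'), ('O','K'), ('X','A')] := by decide

theorem pvREPL_gen (c : Char) (h1 : c ≠ 'J') (h2 : c ≠ 'B') (h3 : c ≠ 'Z') (h4 : c ≠ 'U')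
    (h5 : c ≠ 'O') (h6 : c ≠ 'X') :
    pvREPL.get? c = none ∧ pvREPL.contains c = false := by
  constructor
  · simp only [PySem.Dict.get?, Option.map_eq_none_iff, List.find?_eq_none, beq_iff_eq,
      Prod.forall, repl_items]
    aesop
  · simp only [PySem.Dict.contains, List.any_eq_false, beq_iff_eq, Prod.forall, repl_items]
    aesop

theorem pvStepA_char (st : List Char × List String × Bool) (c : Char) :
    pvStepA st c = (st.1 ++ [pvTarget c], st.2.1 ++ (pvNote? c).toList,
                    if pvSTD.contains c then st.2.2 else true) := by
  obtain ⟨cl, nt, hd⟩ := st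
  by_cases h1 : c = 'J'
  · subst h1; rfl
  by_cases h2 : c = 'B'
  · subst h2; rfl
  by_cases h3 : c = 'Z'
  · subst h3; rfl
  by_cases h4 : c = 'U'
  · subst h4; rfl
  by_cases h5 : c = 'O'
  · subst h5; rfl
  by_cases h6 : c = 'X'
  · subst h6; rfl
  obtain ⟨hg, hc⟩ := pvREPL_gen c h1 h2 h3 h4 h5 h6
  by_cases hstd : pvSTD.contains c
  · have hm : c ∈ pvSTD := by simpa using hstd
    simp [pvStepA, pvTarget, pvNote?, hg, hm]
  · have hA : ('A' : Char) ≠ c := by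
      rintro rfl; exact hstd (by decide)
    have hm : c ∉ pvSTD := by simpa using hstd
    simp [pvStepA, pvTarget, pvNote?, hg, hc, hm, hA]

theorem pvFoldA (s : List Char) (cl : List Char) (nt : List String) (hd : Bool) :
    s.foldl pvStepA (cl, nt, hd) =
      (cl ++ s.map pvTarget, nt ++ s.filterMap pvNote?,
       hd || s.any (fun c => !(pvSTD.contains c))) := by
  induction s generalizing cl nt hd with
  | nil => simp
  | cons c s ih =>
    simp only [List.foldl_cons, pvStepA_char, ih, List.map_cons, List.filterMap_cons,
      List.any_cons]
    cases hstd : pvSTD.contains c <;> cases h : pvNote? c <;> simp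

theorem pvFoldB_get (l : List Char) (d : PySem.Dict Char Char) (ns : PySem.Set String)
    (c : Char) :
    (l.foldl pvStepB (d, ns)).1.get? c =
      if c ∈ l then some (pvTarget c) else d.get? c := by
  induction l generalizing d ns with
  | nil => simp
  | cons a l ih =>
    simp only [List.foldl_cons, pvStepB, List.mem_cons]
    rw [ih]
    by_cases hc : c ∈ l
    · simp [hc]
    · by_cases hca : c = a
      · subst hca; simp [hc, PySem.Dict.get?_insert_self]
      · simp [hc, hca, PySem.Dict.get?_insert_of_ne _ _ hca]

theorem pvFoldB_mem (l : List Char) (d : PySem.Dict Char Char) (ns : PySem.Set String)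
    (x : String) :
    (x ∈ (l.foldl pvStepB (d, ns)).2) ↔ (x ∈ ns ∨ ∃ c ∈ l, pvNote? c = some x) := by
  induction l generalizing d ns with
  | nil => simp
  | cons a l ih =>
    simp only [List.foldl_cons, pvStepB, List.mem_cons]
    rw [ih]
    by_cases ha : pvTarget a = a
    · simp [ha, pvNote?]
    · simp [ha, PySem.Set.mem_add, pvNote?]
      aesop

theorem pvFoldB_nodup (l : List Char) (d : PySem.Dict Char Char) (ns : PySem.Set String)
    (h : ns.Nodup) : (l.foldl pvStepB (d, ns)).2.Nodup := by
  induction l generalizing d ns h with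
  | nil => exact h
  | cons a l ih =>
    simp only [List.foldl_cons, pvStepB]
    apply ih
    split
    · exact PySem.Set.nodup_add _ _ h
    · exact h

theorem pvMain (s : List Char) :
    (let r := s.foldl pvStepA ([], [], false)
     let unique := if r.2.1 ≠ [] then
         PySem.Str.join ";" (PySem.List.sorted (PySem.Set.ofList r.2.1) (fun x => x))
       else ""
     ((String.ofList r.1, unique, r.2.2) : String × String × Bool)) =
    (let r := (PySem.Set.ofList s).foldl pvStepB (PySem.Dict.empty, ([] : PySem.Set String))
     (String.ofList (s.map (fun c => ((r.1.get? c).getD c))),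
      PySem.Str.join ";" (PySem.List.sorted r.2 (fun x => x)),
      s.any (fun c => !(pvSTD.contains c)))) := by
  simp only [pvFoldA, List.nil_append, Bool.false_or]
  have hmap : s.map (fun c => (((PySem.Set.ofList s).foldl pvStepB
      (PySem.Dict.empty, ([] : PySem.Set String))).1.get? c).getD c) = s.map pvTarget := by
    apply List.map_congr_left
    intro c hc
    rw [pvFoldB_get]
    simp [PySem.Set.mem_ofList, hc]
  rw [hmap]
  have hmem : ∀ x, x ∈ ((PySem.Set.ofList s).foldl pvStepB
      (PySem.Dict.empty, ([] : PySem.Set String))).2 ↔ x ∈ s.filterMap pvNote? := by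
    intro x
    rw [pvFoldB_mem]
    simp only [List.mem_filterMap, PySem.Set.mem_ofList]
    constructor
    · rintro (h | ⟨c, hc, h⟩)
      · simp at h
      · exact ⟨c, hc, h⟩
    · rintro ⟨c, hc, h⟩
      exact Or.inr ⟨c, hc, h⟩
  by_cases hn : s.filterMap pvNote? = []
  · have hB : ((PySem.Set.ofList s).foldl pvStepB
        (PySem.Dict.empty, ([] : PySem.Set String))).2 = [] := by
      apply List.eq_nil_iff_forall_not_mem.mpr
      intro x hx
      rw [hmem] at hx
      simp [hn] at hx
    simp [hn, hB]
    decide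
  · have hperm : (((PySem.Set.ofList s).foldl pvStepB
        (PySem.Dict.empty, ([] : PySem.Set String))).2).Perm (PySem.Set.ofList (s.filterMap pvNote?)) := by
      rw [List.perm_ext_iff_of_nodup
        (pvFoldB_nodup _ _ _ List.nodup_nil) (PySem.Set.nodup_ofList _)]
      intro x
      rw [hmem, PySem.Set.mem_ofList]
    have hsort := PySem.List.sorted_eq_sorted_of_perm _ _ (fun x => x)
      (fun _ _ h => h) hperm
    simp [hn, hsort]

-- ===== VERDICT (by name: the statement is the Claim_ definition above) =====
theorem clean_sequence_for_fmap_spec : Claim_equal_clean_sequence_for_fmap := by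
  intro seq _
  unfold Spec_clean_sequence_for_fmap clean_sequence_for_fmap clean_sequence_for_fmap_alt
  exact pvMain _
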